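-- pv_equiv track=rewrite | github.com/touretzkyds/cozmo-tools | cozmo_fsm/particle.py | sort_wmobject_ids
-- ===== SOURCE A (Python) =====
-- def sort_wmobject_ids(ids):
--     preference = ['Charger','Cube','Aruco','Wall','Doorway','CustomCube','CustomMarker','Room','Face']
--
--     def key(id):
--         index = 0
--         for prefix in preference:
--             if id.startswith(prefix):
--                 break
--             else:
--                 index += 1
--         return ('%02d' % index) + id
--
--     result = sorted(ids, key=key)
--     return result
-- ===== SOURCE B (Python) =====
-- def sort_wmobject_ids(ids):
--     preference = ['Charger','Cube','Aruco','Wall','Doorway','CustomCube','CustomMarker','Room','Face']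
--
--     def pref_index(id):
--         i = 0
--         for prefix in preference:
--             if id.startswith(prefix):
--                 return i
--             i += 1
--         return i
--
--     indexed = [(s, pref_index(s)) for s in ids]
--     result = []
--     for i in range(10):
--         result += sorted(s for s, k in indexed if k == i)
--     return result
-- ===== Notes on version B (the rewrite author's own statement) =====
-- stated objective: alternative
-- what changed: Replaces A's single sort under a composite '%02d'+id string key by a group-by strategy: compute each id's preference index once, filter the ids into the 10 preference buckets (unmatched prefix -> bucket 9), plain-sort each bucket by id, and concatenate the buckets in index order.
import Mathlib
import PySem

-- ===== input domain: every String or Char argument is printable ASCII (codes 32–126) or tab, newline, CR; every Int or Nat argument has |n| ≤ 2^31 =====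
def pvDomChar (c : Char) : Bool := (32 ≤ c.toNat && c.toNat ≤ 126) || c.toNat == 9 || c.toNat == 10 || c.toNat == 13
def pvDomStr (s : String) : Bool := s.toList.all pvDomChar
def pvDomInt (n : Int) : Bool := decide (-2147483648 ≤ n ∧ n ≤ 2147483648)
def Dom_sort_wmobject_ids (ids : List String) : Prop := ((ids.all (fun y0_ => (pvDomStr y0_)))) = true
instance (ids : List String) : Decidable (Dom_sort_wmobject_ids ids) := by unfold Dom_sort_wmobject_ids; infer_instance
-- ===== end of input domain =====

-- B replaces A's single sort under a composite '%02d'+id key by: filter ids into the 10 preference buckets, plain-sort each bucket, concatenate (alternative decomposition, same result).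

-- ===== PORT A =====
def pvPreference : List String := ["Charger","Cube","Aruco","Wall","Doorway","CustomCube","CustomMarker","Room","Face"]

-- 'index = 0; for prefix in preference: if id.startswith(prefix): break else: index += 1'
def pvAIndex (id : String) : List String → Int
  | [] => 0
  | p :: rest => if PySem.Str.startswith id p then 0 else 1 + pvAIndex id rest

-- '%02d' % index, hand-ported: str(index) left-padded with '0' to width 2 (exact for 0 ≤ index < 100);
-- the key string is kept as List Char (Python's lexicographic str-compare = lex order on the char list)
def pvPad2 (n : Int) : List Char :=
  let s := PySem.Int.toChars n
  List.replicate (2 - s.length) '0' ++ s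

def pvAKey (id : String) : List Char := pvPad2 (pvAIndex id pvPreference) ++ id.toList

def sort_wmobject_ids (ids : List String) : List String :=
  PySem.List.sorted ids pvAKey false

-- ===== PORT B =====
-- pref_index: running counter i; returns len(preference) (= 9) when no prefix matches
def pvBIndex (id : String) (i : Int) : List String → Int
  | [] => i
  | p :: rest => if PySem.Str.startswith id p then i else pvBIndex id (i + 1) rest

def sort_wmobject_ids_alt (ids : List String) : List String :=
  let indexed := ids.map (fun s => (s, pvBIndex s 0 pvPreference))
  (PySem.List.pyRange 0 10 1).foldl
    (fun result i =>
      result ++ PySem.List.sorted ((indexed.filter (fun p => p.2 == i)).map (fun p => p.1)) (fun s => s.toList) false)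
    []

-- ===== PRECONDITION & SPEC =====
def Spec_sort_wmobject_ids (ids : List String) (out : List String) : Prop := out = sort_wmobject_ids_alt ids
instance (ids : List String) (out : List String) : Decidable (Spec_sort_wmobject_ids ids out) := by unfold Spec_sort_wmobject_ids; infer_instance

-- ===== CLAIM (what is proved, stated in full; the proofs are below) =====
def Claim_equal_sort_wmobject_ids : Prop := ∀ (ids : List String), Dom_sort_wmobject_ids ids → Spec_sort_wmobject_ids ids (sort_wmobject_ids ids)

-- ===== LEMMAS AND PROOFS =====

def pvDigit (n : Int) : Char := Char.ofNat (48 + n.toNat)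

-- PySem.List.sorted applied at the ports' (core) List-order instances equals it at Mathlib's LinearOrder instances
lemma sorted_irrel {α : Type} (xs : List α) (key : α → List Char) (r : Bool) :
    @PySem.List.sorted α (List Char) List.instLT (fun a b => a.decidableLT b) xs key r
      = @PySem.List.sorted α (List Char) List.instLinearOrder.toLT LinearOrder.toDecidableLT xs key r := by
  congr 1

lemma pvBIndex_eq (id : String) (prefs : List String) : ∀ i : Int, pvBIndex id i prefs = i + pvAIndex id prefs := by
  induction prefs with
  | nil => intro i; simp [pvBIndex, pvAIndex]
  | cons p rest ih =>
      intro i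
      simp only [pvBIndex, pvAIndex]
      split
      · simp
      · rw [ih]; ring

lemma pvAIndex_bounds (id : String) (prefs : List String) :
    0 ≤ pvAIndex id prefs ∧ pvAIndex id prefs ≤ prefs.length := by
  induction prefs with
  | nil => simp [pvAIndex]
  | cons p rest ih =>
      simp only [pvAIndex, List.length_cons]
      split
      · constructor <;> omega
      · omega

lemma pvPad2_eq (n : Int) (h0 : 0 ≤ n) (h9 : n ≤ 9) : pvPad2 n = ['0', pvDigit n] := by
  interval_cases n <;> decide

lemma pvDigit_lt (m n : Int) (h0 : 0 ≤ m) (h9 : n ≤ 9) : m < n → pvDigit m < pvDigit n := by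
  intro hmn
  have h1 : m ≤ 9 := by omega
  have h2 : 0 ≤ n := by omega
  interval_cases m <;> interval_cases n <;> decide

lemma pad_append_lt (m n : Int) (h0 : 0 ≤ m) (hmn : m < n) (h9 : n ≤ 9)
    (x y : List Char) : pvPad2 m ++ x < pvPad2 n ++ y := by
  rw [pvPad2_eq m h0 (by omega), pvPad2_eq n (by omega) h9]
  simp only [List.cons_append, List.nil_append]
  rw [List.cons_lt_cons_iff]
  right
  exact ⟨rfl, by rw [List.cons_lt_cons_iff]; left; exact pvDigit_lt m n h0 h9 hmn⟩

lemma append_lt_cancel (p : List Char) {x y : List Char} : p ++ x < p ++ y → x < y := by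
  induction p with
  | nil => intro h; simpa using h
  | cons c p ih =>
      intro h
      rw [List.cons_append, List.cons_append, List.cons_lt_cons_iff] at h
      rcases h with h | ⟨_, h⟩
      · exact absurd h (lt_irrefl c)
      · exact ih h

lemma append_le_append_left (p x y : List Char) (h : x ≤ y) : p ++ x ≤ p ++ y :=
  not_lt.mp (fun hlt => absurd (append_lt_cancel p hlt) (not_lt.mpr h))

lemma pvAKey_injective : Function.Injective pvAKey := by
  intro a b h
  unfold pvAKey at h
  have ha := pvAIndex_bounds a pvPreference
  have hb := pvAIndex_bounds b pvPreference
  have hl : (pvPreference.length : Int) = 9 := by decide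
  rw [pvPad2_eq _ ha.1 (by omega), pvPad2_eq _ hb.1 (by omega)] at h
  simp only [List.cons_append, List.nil_append, List.cons.injEq] at h
  exact String.toList_inj.mp h.2.2

-- the B-side loop is the concatenation of the ten buckets
lemma bucket_eq (ids : List String) (i : Int) :
    ((ids.map (fun s => (s, pvBIndex s 0 pvPreference))).filter (fun p => p.2 == i)).map (fun p => p.1)
      = ids.filter (fun s => pvBIndex s 0 pvPreference == i) := by
  rw [List.filter_map, List.map_map]
  simp [Function.comp_def]

lemma alt_eq_flatMap (ids : List String) :
    sort_wmobject_ids_alt ids =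
      ([0,1,2,3,4,5,6,7,8,9] : List Int).flatMap
        (fun i => PySem.List.sorted (ids.filter (fun s => pvBIndex s 0 pvPreference == i)) (fun s => s.toList) false) := by
  simp only [sort_wmobject_ids_alt]
  rw [show PySem.List.pyRange 0 10 1 = ([0,1,2,3,4,5,6,7,8,9] : List Int) from by decide]
  rw [PySem.List.foldl_append_eq_flatMap]
  simp [bucket_eq]

lemma mem_bucket {ids : List String} {i : Int} {x : String}
    (hx : x ∈ PySem.List.sorted (ids.filter (fun s => pvBIndex s 0 pvPreference == i)) (fun s => s.toList) false) :
    x ∈ ids ∧ pvAIndex x pvPreference = i := by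
  rw [PySem.List.mem_sorted, List.mem_filter] at hx
  refine ⟨hx.1, ?_⟩
  have h2 := hx.2
  rw [pvBIndex_eq] at h2
  simpa using h2

lemma flatMap_perm (ids : List String) :
    (([0,1,2,3,4,5,6,7,8,9] : List Int).flatMap
        (fun i => PySem.List.sorted (ids.filter (fun s => pvBIndex s 0 pvPreference == i)) (fun s => s.toList) false)).Perm ids := by
  rw [List.perm_iff_count]
  intro a
  rw [List.count_flatMap]
  simp only [List.map_cons, List.map_nil, Function.comp]
  have hc : ∀ i : Int, (PySem.List.sorted (ids.filter (fun s => pvBIndex s 0 pvPreference == i)) (fun s => s.toList) false).count a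
      = if pvAIndex a pvPreference = i then ids.count a else 0 := by
    intro i
    rw [(PySem.List.sorted_perm _ _ _).count_eq]
    by_cases h : pvAIndex a pvPreference = i
    · rw [if_pos h, List.count_filter]
      rw [pvBIndex_eq]
      simp [h]
    · rw [if_neg h]
      rw [List.count_eq_zero]
      intro hmem
      rw [List.mem_filter, pvBIndex_eq] at hmem
      have := hmem.2
      simp at this
      exact h this
  simp only [hc]
  have hb := pvAIndex_bounds a pvPreference
  have hl : (pvPreference.length : Int) = 9 := by decide
  have hk0 : 0 ≤ pvAIndex a pvPreference := hb.1
  have hk9 : pvAIndex a pvPreference ≤ 9 := by omega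
  set k := pvAIndex a pvPreference with hk
  clear_value k
  interval_cases k <;> simp

lemma flatMap_pairwise (ids : List String) :
    (([0,1,2,3,4,5,6,7,8,9] : List Int).flatMap
        (fun i => PySem.List.sorted (ids.filter (fun s => pvBIndex s 0 pvPreference == i)) (fun s => s.toList) false)).Pairwise
      (fun a b => pvAKey a ≤ pvAKey b) := by
  rw [List.pairwise_flatMap]
  constructor
  · intro i _
    have hp := PySem.List.sorted_pairwise (ids.filter (fun s => pvBIndex s 0 pvPreference == i)) (fun s => s.toList)
    rw [← sorted_irrel] at hp
    refine hp.imp_of_mem ?_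
    intro a b ha hb hle
    have hia := (mem_bucket ha).2
    have hib := (mem_bucket hb).2
    unfold pvAKey
    rw [hia, hib]
    exact append_le_append_left _ _ _ hle
  · have hlt : (([0,1,2,3,4,5,6,7,8,9] : List Int)).Pairwise (· < ·) := by decide
    have hmem : ∀ i ∈ ([0,1,2,3,4,5,6,7,8,9] : List Int), 0 ≤ i ∧ i ≤ 9 := by decide
    refine hlt.imp_of_mem ?_
    intro i j hi hj hij x hx y hy
    have hix := (mem_bucket hx).2
    have hiy := (mem_bucket hy).2
    unfold pvAKey
    rw [hix, hiy]
    exact le_of_lt (pad_append_lt i j (hmem i hi).1 hij (hmem j hj).2 _ _)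

theorem sort_eq (ids : List String) : sort_wmobject_ids ids = sort_wmobject_ids_alt ids := by
  rw [alt_eq_flatMap]
  unfold sort_wmobject_ids
  refine PySem.List.eq_of_perm_of_pairwise_le_of_injective pvAKey pvAKey_injective ?_ ?_ ?_
  · exact (PySem.List.sorted_perm ids pvAKey false).trans (flatMap_perm ids).symm
  · have hp := PySem.List.sorted_pairwise ids pvAKey
    rw [← sorted_irrel] at hp
    exact hp
  · exact flatMap_pairwise ids

-- ===== VERDICT (by name: the statement is the Claim_ definition above) =====
theorem sort_wmobject_ids_spec : Claim_equal_sort_wmobject_ids := by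
  intro ids _
  unfold Spec_sort_wmobject_ids
  exact sort_eq ids
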